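-- pv_equiv track=rewrite | github.com/farshidjf/advent-of-code-2020 | Day06/puzzle.py | extract_groups2
-- ===== SOURCE A (Python) =====
-- def extract_groups2(data):
--     from string import ascii_lowercase
--     lines = data.splitlines()
--     groups = [set(ascii_lowercase)]
--     person = set()
--     i = 0
--     for line in lines:
--         if line:
--             person = set()
--             for l in line:
--                 person.add(l)
--             groups[i] = groups[i].intersection(person)
--         else:
--             i += 1
--             groups.append(set(ascii_lowercase))
--     return groups
-- ===== SOURCE B (Python) =====
-- def extract_groups2(data):
--     from string import ascii_lowercase
--     # Partition the lines into segments separated by blank lines,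
--     # then map each segment to the intersection of its persons' letter sets.
--     segments = []
--     cur = []
--     for line in data.splitlines():
--         if line:
--             cur.append(line)
--         else:
--             segments.append(cur)
--             cur = []
--     segments.append(cur)
--     return [set(ascii_lowercase).intersection(*map(set, seg)) for seg in segments]
-- ===== Notes on version B (the rewrite author's own statement) =====
-- stated objective: simpler
-- what changed: B first partitions the lines into blank-separated segments with a plain accumulator (no indexed in-place update of the result list) and then maps each segment to one intersection set(ascii_lowercase).intersection(*map(set, seg)), instead of A's single pass that mutates groups[i] while tracking an index i and a person set.
import Mathlib
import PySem

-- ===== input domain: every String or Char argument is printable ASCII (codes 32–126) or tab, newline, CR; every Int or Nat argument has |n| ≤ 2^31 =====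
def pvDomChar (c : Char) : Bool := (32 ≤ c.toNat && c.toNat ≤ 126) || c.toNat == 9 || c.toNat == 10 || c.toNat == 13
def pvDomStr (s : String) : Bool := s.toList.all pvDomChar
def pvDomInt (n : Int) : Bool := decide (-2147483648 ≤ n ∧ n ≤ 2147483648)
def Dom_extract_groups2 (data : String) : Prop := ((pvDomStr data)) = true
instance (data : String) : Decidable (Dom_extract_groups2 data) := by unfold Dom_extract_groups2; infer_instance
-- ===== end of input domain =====

-- B partitions the lines into blank-separated segments and maps each to one intersection,
-- instead of A's single pass mutating groups[i] with an index counter; objective: simpler.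


-- set(ascii_lowercase): the 26 distinct lowercase letters as 1-char strings, in string order
-- (a literal of string.ascii_lowercase; distinct, so set() keeps them in this insertion order)
def pvAlphaSet : List String :=
  ["a","b","c","d","e","f","g","h","i","j","k","l","m",
   "n","o","p","q","r","s","t","u","v","w","x","y","z"]

-- ===== PORT A =====
def extract_groups2 (data : String) : List (List String) :=
  let lines := PySem.Str.splitlines data
  let st :=
    lines.foldl
      (fun (st : List (List String) × List String × Int) line =>
        let groups := st.1
        let person := st.2.1
        let i := st.2.2
        if line ≠ "" then
          -- person = set(); for l in line: person.add(l)
          let person := (line.toList.map (fun c => String.ofList [c])).foldl PySem.Set.add PySem.Set.empty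
          -- groups[i] = groups[i].intersection(person)
          (PySem.List.pySetD groups i (PySem.Set.inter (PySem.List.pyGetD groups i []) person), person, i)
        else
          -- i += 1; groups.append(set(ascii_lowercase))
          (groups ++ [pvAlphaSet], person, i + 1))
      ([pvAlphaSet], PySem.Set.empty, (0 : Int))
  st.1

-- ===== PORT B =====
def extract_groups2_alt (data : String) : List (List String) :=
  let st :=
    (PySem.Str.splitlines data).foldl
      (fun (st : List (List String) × List String) line =>
        if line ≠ "" then (st.1, st.2 ++ [line])
        else (st.1 ++ [st.2], []))
      ([], [])
  let segments := st.1 ++ [st.2]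
  -- [set(ascii_lowercase).intersection(*map(set, seg)) for seg in segments]
  segments.map (fun seg =>
    seg.foldl
      (fun acc line => PySem.Set.inter acc (PySem.Set.ofList (line.toList.map (fun c => String.ofList [c]))))
      pvAlphaSet)

-- ===== PRECONDITION & SPEC =====
def Spec_extract_groups2 (data : String) (out : List (List String)) : Prop := out = extract_groups2_alt data
instance (data : String) (out : List (List String)) : Decidable (Spec_extract_groups2 data out) := by unfold Spec_extract_groups2; infer_instance

-- ===== CLAIM (what is proved, stated in full; the proofs are below) =====
def Claim_equal_extract_groups2 : Prop := ∀ (data : String), Dom_extract_groups2 data → Spec_extract_groups2 data (extract_groups2 data)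

-- ===== LEMMAS AND PROOFS =====

-- A's loop step (same body as the lambda in extract_groups2)
def pvStepA (st : List (List String) × List String × Int) (line : String) :
    List (List String) × List String × Int :=
  if line ≠ "" then
    let person := (line.toList.map (fun c => String.ofList [c])).foldl PySem.Set.add PySem.Set.empty
    (PySem.List.pySetD st.1 st.2.2 (PySem.Set.inter (PySem.List.pyGetD st.1 st.2.2 []) person), person, st.2.2)
  else
    (st.1 ++ [pvAlphaSet], st.2.1, st.2.2 + 1)

-- B's partition step (same body as the lambda in extract_groups2_alt)
def pvStepB (st : List (List String) × List String) (line : String) :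
    List (List String) × List String :=
  if line ≠ "" then (st.1, st.2 ++ [line]) else (st.1 ++ [st.2], [])

-- the per-segment intersection B computes
def pvF (seg : List String) : List String :=
  seg.foldl
    (fun acc line => PySem.Set.inter acc (PySem.Set.ofList (line.toList.map (fun c => String.ofList [c]))))
    pvAlphaSet

theorem pvGetD_append_len {α : Type} (xs : List α) (x d : α) :
    (xs ++ [x]).getD xs.length d = x := by
  simp [List.getD]

theorem pvSet_append_len {α : Type} (xs : List α) (x v : α) :
    (xs ++ [x]).set xs.length v = xs ++ [v] := by
  induction xs with
  | nil => rfl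
  | cons y ys ih => simp [ih]

theorem pvMain (lines : List String) :
    ∀ (spre : List (List String)) (scur p : List String),
      (lines.foldl pvStepA (spre.map pvF ++ [pvF scur], p, (spre.length : Int))).1
      = ((lines.foldl pvStepB (spre, scur)).1 ++ [(lines.foldl pvStepB (spre, scur)).2]).map pvF := by
  induction lines with
  | nil => simp
  | cons l ls ih =>
    intro spre scur p
    rw [List.foldl_cons, List.foldl_cons]
    by_cases h : l = ""
    · have hA : pvStepA (spre.map pvF ++ [pvF scur], p, (spre.length : Int)) l
          = ((spre ++ [scur]).map pvF ++ [pvF []], p, (((spre ++ [scur]).length : Nat) : Int)) := by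
        subst h
        simp [pvStepA, pvF, List.map_append]
      have hB : pvStepB (spre, scur) l = (spre ++ [scur], []) := by
        subst h; simp [pvStepB]
      rw [hA, hB]
      exact ih (spre ++ [scur]) [] p
    · have hperson : (l.toList.map (fun c => String.ofList [c])).foldl PySem.Set.add PySem.Set.empty
          = PySem.Set.ofList (l.toList.map (fun c => String.ofList [c])) := by
        rw [PySem.Set.ofList_eq_foldl]; rfl
      have hget : PySem.List.pyGetD (spre.map pvF ++ [pvF scur]) (spre.length : Int) []
          = pvF scur := by
        rw [PySem.List.pyGetD_natCast]
        have h2 := pvGetD_append_len (spre.map pvF) (pvF scur) []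
        simp only [List.length_map] at h2
        exact h2
      have hF : pvF (scur ++ [l])
          = PySem.Set.inter (pvF scur) (PySem.Set.ofList (l.toList.map (fun c => String.ofList [c]))) := by
        simp [pvF, List.foldl_append]
      have hset : PySem.List.pySetD (spre.map pvF ++ [pvF scur]) (spre.length : Int)
            (PySem.Set.inter (pvF scur) (PySem.Set.ofList (l.toList.map (fun c => String.ofList [c]))))
          = spre.map pvF ++ [pvF (scur ++ [l])] := by
        rw [PySem.List.pySetD_natCast, hF]
        have h3 := pvSet_append_len (spre.map pvF) (pvF scur)
          (PySem.Set.inter (pvF scur) (PySem.Set.ofList (l.toList.map (fun c => String.ofList [c]))))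
        simp only [List.length_map] at h3
        exact h3
      have hA : pvStepA (spre.map pvF ++ [pvF scur], p, (spre.length : Int)) l
          = (spre.map pvF ++ [pvF (scur ++ [l])],
             PySem.Set.ofList (l.toList.map (fun c => String.ofList [c])), (spre.length : Int)) := by
        simp only [pvStepA, if_pos (show l ≠ "" from h), hperson, hget, hset]
      have hB : pvStepB (spre, scur) l = (spre, scur ++ [l]) := by
        simp [pvStepB, h]
      rw [hA, hB]
      exact ih spre (scur ++ [l]) _

-- ===== VERDICT (by name: the statement is the Claim_ definition above) =====
theorem extract_groups2_spec : Claim_equal_extract_groups2 := by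
  intro data _
  unfold Spec_extract_groups2 extract_groups2 extract_groups2_alt
  exact pvMain (PySem.Str.splitlines data) [] [] PySem.Set.empty
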